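-- pv_equiv track=rewrite | github.com/CHENZhoujing/m1-ai-project | main_func.py | goal_generator
-- ===== SOURCE A (Python) =====
-- def goal_generator(length_matrix: int) -> [[]]:
--     matrix = [[0 for x in range(length_matrix)] for y in range(length_matrix)]
--     for i in range(length_matrix):
--         for j in range(length_matrix):
--             val = i * length_matrix + j + 1
--             if val != length_matrix * length_matrix:
--                 matrix[i][j] = val
--     return matrix
-- ===== SOURCE B (Python) =====
-- def goal_generator(length_matrix: int) -> [[]]:
--     if length_matrix <= 0:
--         return []
--     flat = list(range(1, length_matrix * length_matrix)) + [0]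
--     return [flat[i * length_matrix:(i + 1) * length_matrix] for i in range(length_matrix)]
-- ===== Notes on version B (the rewrite author's own statement) =====
-- stated objective: simpler
-- what changed: Builds the flat row-major sequence 1..n*n-1 followed by 0 in one step and reshapes it into rows by slicing, instead of allocating a zero matrix and overwriting each cell with per-cell index arithmetic and a last-cell guard.
import Mathlib
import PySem

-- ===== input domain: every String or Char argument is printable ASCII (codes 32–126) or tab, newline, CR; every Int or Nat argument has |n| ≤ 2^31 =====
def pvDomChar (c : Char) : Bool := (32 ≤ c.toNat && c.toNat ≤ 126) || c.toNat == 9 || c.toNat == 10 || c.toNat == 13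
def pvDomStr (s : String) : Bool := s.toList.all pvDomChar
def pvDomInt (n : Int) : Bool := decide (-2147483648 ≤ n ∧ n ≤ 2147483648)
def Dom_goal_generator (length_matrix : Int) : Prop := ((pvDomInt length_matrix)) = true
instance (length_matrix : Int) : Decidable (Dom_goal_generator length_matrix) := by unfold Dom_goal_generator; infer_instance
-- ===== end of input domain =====

-- B builds the flat sequence 1..n*n-1 followed by 0 and reshapes it into rows by slicing,
-- instead of A's zero matrix overwritten cell by cell with a last-cell guard (objective: simpler).

-- ===== PORT A =====
def goal_generator (length_matrix : Int) : List (List Int) :=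
  let matrix := (PySem.List.pyRange 0 length_matrix 1).map
    (fun _ => (PySem.List.pyRange 0 length_matrix 1).map (fun _ => (0 : Int)))
  (PySem.List.pyRange 0 length_matrix 1).foldl (fun m i =>
    (PySem.List.pyRange 0 length_matrix 1).foldl (fun m j =>
      let val := i * length_matrix + j + 1
      if val ≠ length_matrix * length_matrix then
        -- matrix[i][j] = val : i, j come from range(length_matrix), so both indices are in range
        m.set i.toNat ((m.getD i.toNat []).set j.toNat val)
      else m) m) matrix

-- ===== PORT B =====
def goal_generator_alt (length_matrix : Int) : List (List Int) :=
  if length_matrix ≤ 0 then [] else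
  let flat := PySem.List.pyRange 1 (length_matrix * length_matrix) 1 ++ [(0 : Int)]
  (PySem.List.pyRange 0 length_matrix 1).map (fun i =>
    PySem.List.slice flat (some (i * length_matrix)) (some ((i + 1) * length_matrix)))

-- ===== PRECONDITION & SPEC =====
def Spec_goal_generator (length_matrix : Int) (out : List (List Int)) : Prop := out = goal_generator_alt length_matrix
instance (length_matrix : Int) (out : List (List Int)) : Decidable (Spec_goal_generator length_matrix out) := by unfold Spec_goal_generator; infer_instance

-- ===== CLAIM (what is proved, stated in full; the proofs are below) =====
def Claim_equal_goal_generator : Prop := ∀ (length_matrix : Int), Dom_goal_generator length_matrix → Spec_goal_generator length_matrix (goal_generator length_matrix)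

-- ===== LEMMAS AND PROOFS =====

-- setting one cell of a map-over-range list
theorem pv_set_map_range {α : Type} (n k : Nat) (_hk : k < n) (g : Nat → α) (x : α) :
    ((List.range n).map g).set k x = (List.range n).map (fun j => if j = k then x else g j) := by
  apply List.ext_getElem
  · simp
  · intro j h1 h2
    simp only [List.getElem_set, List.getElem_map, List.getElem_range]
    by_cases h : j = k
    · rw [if_pos (by omega), if_pos h]
    · rw [if_neg (by omega), if_neg h]

-- the inner Python loop only touches row i: it is a fold on that row, re-inserted
theorem pv_inner_fold (P : Nat → Prop) [DecidablePred P] (w : Nat → Int) (i : Nat) :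
    ∀ (js : List Nat) (m : List (List Int)), i < m.length →
      js.foldl (fun m j => if P j then m.set i ((m.getD i []).set j (w j)) else m) m
      = m.set i (js.foldl (fun r j => if P j then r.set j (w j) else r) (m.getD i [])) := by
  intro js
  induction js with
  | nil =>
    intro m hm
    rw [List.foldl_nil, List.foldl_nil, List.getD_eq_getElem _ _ hm, List.set_getElem_self]
  | cons j js ih =>
    intro m hm
    rw [List.foldl_cons, List.foldl_cons]
    by_cases hP : P j
    · rw [if_pos hP, if_pos hP, ih _ (by simpa using hm)]
      have h1 : (m.set i ((m.getD i []).set j (w j))).getD i [] = (m.getD i []).set j (w j) := by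
        rw [List.getD_eq_getElem _ _ (by simpa using hm), List.getElem_set_self]
      rw [h1, List.set_set]
    · rw [if_neg hP, if_neg hP]
      exact ih m hm

-- filling a zero row left to right
theorem pv_row_fill (n : Nat) (P : Nat → Prop) [DecidablePred P] (w : Nat → Int) :
    ∀ k, k ≤ n →
      (List.range k).foldl (fun r j => if P j then r.set j (w j) else r)
          ((List.range n).map (fun _ => (0 : Int)))
      = (List.range n).map (fun j => if j < k ∧ P j then w j else 0) := by
  intro k
  induction k with
  | zero => intro _; simp
  | succ k ih =>
    intro hk
    rw [List.range_succ, List.foldl_append, ih (by omega)]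
    simp only [List.foldl_cons, List.foldl_nil]
    by_cases hP : P k
    · rw [if_pos hP, pv_set_map_range n k (by omega)]
      apply List.map_congr_left
      intro j _
      by_cases hj : j = k
      · subst hj; simp [hP]
      · simp only [if_neg hj]
        congr 1
        simp only [eq_iff_iff]
        constructor <;> rintro ⟨h1, h2⟩ <;> exact ⟨by omega, h2⟩
    · rw [if_neg hP]
      apply List.map_congr_left
      intro j _
      congr 1
      simp only [eq_iff_iff]
      constructor <;> rintro ⟨h1, h2⟩
      · exact ⟨by omega, h2⟩
      · refine ⟨?_, h2⟩
        rcases Nat.lt_succ_iff_lt_or_eq.mp h1 with h | h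
        · exact h
        · exact absurd (h ▸ h2) hP

-- A's nested loops fill the rows top to bottom
theorem pv_A_fill (n : Nat) :
    ∀ k, k ≤ n →
      (List.range k).foldl (fun m (i : Nat) => (List.range n).foldl (fun m (j : Nat) =>
          if ((i : Int) * n + (j : Int) + 1) ≠ (n : Int) * n then
            m.set i ((m.getD i []).set j ((i : Int) * n + (j : Int) + 1))
          else m) m)
        ((List.range n).map (fun _ => (List.range n).map (fun _ => (0 : Int))))
      = (List.range n).map (fun i => if i < k then
          (List.range n).map (fun j => if j < n ∧ ((i : Int) * n + (j : Int) + 1) ≠ (n : Int) * n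
            then (i : Int) * n + (j : Int) + 1 else 0)
          else (List.range n).map (fun _ => (0 : Int))) := by
  intro k
  induction k with
  | zero => intro _; simp
  | succ k ih =>
    intro hk
    rw [List.range_succ, List.foldl_append, ih (by omega)]
    simp only [List.foldl_cons, List.foldl_nil]
    rw [pv_inner_fold (fun j => ((k : Int) * n + (j : Int) + 1) ≠ (n : Int) * n)
          (fun j => (k : Int) * n + (j : Int) + 1) k _ _ (by simp; omega)]
    have hgd : (((List.range n).map (fun i => if i < k then
          (List.range n).map (fun j => if j < n ∧ ((i : Int) * n + (j : Int) + 1) ≠ (n : Int) * n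
            then (i : Int) * n + (j : Int) + 1 else 0)
          else (List.range n).map (fun _ => (0 : Int)))).getD k [])
        = (List.range n).map (fun _ => (0 : Int)) := by
      rw [List.getD_eq_getElem _ _ (by simp; omega)]
      simp
    rw [hgd, pv_row_fill n _ _ n le_rfl, pv_set_map_range n k (by omega)]
    apply List.map_congr_left
    intro i _
    by_cases hi : i = k
    · subst hi; simp
    · simp only [if_neg hi]
      congr 1
      simp only [eq_iff_iff]
      omega

-- drop-take of a map over range
theorem pv_drop_take_map_range (m a b : Nat) (g : Nat → Int) (h : a + b ≤ m) :
    (((List.range m).map g).drop a).take b = (List.range b).map (fun t => g (a + t)) := by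
  apply List.ext_getElem
  · simp; omega
  · intro j h1 h2
    simp only [List.getElem_take, List.getElem_drop, List.getElem_map, List.getElem_range]

-- the flat list of B, written as one comprehension
theorem pv_flat_eq (n : Nat) (hn : 0 < n) :
    PySem.List.pyRange 1 ((n : Int) * (n : Int)) 1 ++ [(0 : Int)]
      = (List.range (n * n)).map (fun t => if t + 1 = n * n then (0 : Int) else (t : Int) + 1) := by
  rw [PySem.List.pyRange_one]
  have h1 : (((n : Int) * n - 1)).toNat = n * n - 1 := by
    have h : (n : Int) * n = ((n * n : Nat) : Int) := by push_cast; ring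
    rw [h]; omega
  rw [h1]
  have h2 : n * n = (n * n - 1) + 1 := by
    have : 0 < n * n := Nat.mul_pos hn hn
    omega
  conv_rhs => rw [h2, List.range_succ, List.map_append]
  congr 1
  · apply List.map_congr_left
    intro t ht
    rw [List.mem_range] at ht
    rw [if_neg (by omega)]
    omega
  · simp

-- ===== VERDICT (by name: the statement is the Claim_ definition above) =====
theorem goal_generator_spec : Claim_equal_goal_generator := by
  intro L _
  unfold Spec_goal_generator goal_generator goal_generator_alt
  by_cases hL : L ≤ 0
  · rw [if_pos hL, PySem.List.pyRange_one_eq_nil hL]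
    simp
  · rw [not_le] at hL
    obtain ⟨n, rfl⟩ : ∃ n : Nat, L = (n : Int) := ⟨L.toNat, by omega⟩
    have hn : 0 < n := by exact_mod_cast hL
    have hrange : PySem.List.pyRange 0 (n : Int) 1 = @List.map Nat Int (fun k => (k : Int)) (List.range n) := by
      rw [PySem.List.pyRange_one]
      apply List.ext_getElem
      · simp
      · intro j h1 h2
        simp
    rw [if_neg (by omega), hrange, pv_flat_eq n hn]
    simp only [List.foldl_map, List.map_map, Function.comp_def, Int.toNat_natCast]
    rw [pv_A_fill n n le_rfl]
    apply List.map_congr_left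
    intro i hi
    rw [List.mem_range] at hi
    rw [if_pos hi]
    -- B's row i: slice = drop/take on the flat comprehension
    have hc1 : (i : Int) * n = ((i * n : Nat) : Int) := by push_cast; ring
    have hc2 : ((i : Int) + 1) * n = ((i * n + n : Nat) : Int) := by push_cast; ring
    rw [hc1, hc2, PySem.List.slice_natCast,
        show i * n + n - i * n = n by omega,
        pv_drop_take_map_range (n * n) (i * n) n _ (by nlinarith)]
    have hc3 : (n : Int) * n = ((n * n : Nat) : Int) := by push_cast; ring
    rw [hc3]
    apply List.map_congr_left
    intro j hj
    rw [List.mem_range] at hj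
    by_cases hc : i * n + j + 1 = n * n
    · rw [if_neg (fun h => h.2 (by exact_mod_cast hc)), if_pos hc]
    · rw [if_pos ⟨hj, fun h => hc (by exact_mod_cast h)⟩, if_neg hc]
      push_cast; ring
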